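-- pv_equiv track=rewrite | github.com/R-Ohman/systems-of-linear-equations | main.py | create_system_matrix
-- ===== SOURCE A (Python) =====
-- def create_system_matrix(a1, a2, a3, size):
--     matrix = [[0 for _ in range(size)] for _ in range(size)]
--     for i in range(size):
--         matrix[i][i] = a1
--         if i < size - 1:
--             matrix[i + 1][i] = a2
--             matrix[i][i + 1] = a2
--         if i < size - 2:
--             matrix[i + 2][i] = a3
--             matrix[i][i + 2] = a3
--
--     return matrix
-- ===== SOURCE B (Python) =====
-- def create_system_matrix(a1, a2, a3, size):
--     band = {0: a1, 1: a2, 2: a3}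
--     return [[band.get(abs(i - j), 0) for j in range(size)] for i in range(size)]
-- ===== Notes on version B (the rewrite author's own statement) =====
-- stated objective: idiomatic
-- what changed: B computes every cell directly from the band distance abs(i-j) via a small dict lookup in one row-major comprehension, instead of zero-initializing a matrix and scattering writes onto the five diagonals.
import Mathlib
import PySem

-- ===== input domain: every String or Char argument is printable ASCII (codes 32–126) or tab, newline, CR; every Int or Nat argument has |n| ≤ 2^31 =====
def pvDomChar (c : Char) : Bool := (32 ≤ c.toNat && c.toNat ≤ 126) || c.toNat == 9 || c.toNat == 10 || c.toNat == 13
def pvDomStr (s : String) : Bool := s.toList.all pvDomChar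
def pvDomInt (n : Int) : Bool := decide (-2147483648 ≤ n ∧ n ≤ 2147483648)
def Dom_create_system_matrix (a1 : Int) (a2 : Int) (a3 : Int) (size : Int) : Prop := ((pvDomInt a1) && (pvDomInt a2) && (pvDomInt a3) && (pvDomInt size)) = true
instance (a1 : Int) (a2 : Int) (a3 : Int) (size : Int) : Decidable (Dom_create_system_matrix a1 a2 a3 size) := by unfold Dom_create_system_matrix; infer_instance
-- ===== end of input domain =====

-- B derives every cell from the band distance |i-j| via a 3-entry dict in one row-major pass,
-- instead of A's zero-init + scattered writes onto the five diagonals (idiomatic; same cost).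


-- ===== PORT A =====
-- The two guarded write-pairs of A's loop body, as helpers (i, i+1, i+2 are always the
-- nonnegative in-range Python indices A uses, so Nat indexing with List.modify/List.set is exact).
def pvWrA2 (a2 : Int) (n : Nat) (i : Nat) (m : List (List Int)) : List (List Int) :=
  if i < n - 1 then
    (m.modify (i+1) (fun row => row.set i a2)).modify i (fun row => row.set (i+1) a2)
  else m

def pvWrA3 (a3 : Int) (n : Nat) (i : Nat) (m : List (List Int)) : List (List Int) :=
  if i < n - 2 then
    (m.modify (i+2) (fun row => row.set i a3)).modify i (fun row => row.set (i+2) a3)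
  else m

-- loop body: matrix[i][i] = a1, then the two guarded blocks, in A's order
def pvStepA (a1 : Int) (a2 : Int) (a3 : Int) (n : Nat) (m : List (List Int)) (i : Nat) : List (List Int) :=
  pvWrA3 a3 n i (pvWrA2 a2 n i (m.modify i (fun row => row.set i a1)))

def create_system_matrix (a1 : Int) (a2 : Int) (a3 : Int) (size : Int) : List (List Int) :=
  let n := size.toNat   -- range(size) enumerates 0..size-1 (empty if size ≤ 0)
  let matrix := (List.range n).map (fun _ => (List.range n).map (fun _ => (0 : Int)))
  (List.range n).foldl (pvStepA a1 a2 a3 n) matrix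

-- ===== PORT B =====
def create_system_matrix_alt (a1 : Int) (a2 : Int) (a3 : Int) (size : Int) : List (List Int) :=
  let band := PySem.Dict.ofList [((0 : Int), a1), (1, a2), (2, a3)]
  (List.range size.toNat).map (fun (i : Nat) =>
    (List.range size.toNat).map (fun (j : Nat) => band.getD |(i : Int) - (j : Int)| 0))

-- ===== PRECONDITION & SPEC =====
def Spec_create_system_matrix (a1 : Int) (a2 : Int) (a3 : Int) (size : Int) (out : List (List Int)) : Prop := out = create_system_matrix_alt a1 a2 a3 size
instance (a1 : Int) (a2 : Int) (a3 : Int) (size : Int) (out : List (List Int)) : Decidable (Spec_create_system_matrix a1 a2 a3 size out) := by unfold Spec_create_system_matrix; infer_instance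

-- ===== CLAIM (what is proved, stated in full; the proofs are below) =====
def Claim_equal_create_system_matrix : Prop := ∀ (a1 : Int) (a2 : Int) (a3 : Int) (size : Int), Dom_create_system_matrix a1 a2 a3 size → Spec_create_system_matrix a1 a2 a3 size (create_system_matrix a1 a2 a3 size)

-- ===== LEMMAS AND PROOFS =====

-- the intended entry at (p, q): the band value at distance |p - q|
def pvE (a1 : Int) (a2 : Int) (a3 : Int) (p : Nat) (q : Nat) : Int :=
  if p = q then a1 else if q = p + 1 ∨ p = q + 1 then a2
  else if q = p + 2 ∨ p = q + 2 then a3 else 0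

-- an n×n matrix given pointwise by f
def pvMk (n : Nat) (f : Nat → Nat → Int) : List (List Int) :=
  (List.range n).map (fun p => (List.range n).map (f p))

-- A's matrix after processing loop indices 0..k-1: cells whose min index is < k are set
def pvF (a1 : Int) (a2 : Int) (a3 : Int) (k : Nat) (p : Nat) (q : Nat) : Int :=
  if p < k ∨ q < k then pvE a1 a2 a3 p q else 0

theorem pvMk_congr {n : Nat} {f g : Nat → Nat → Int}
    (h : ∀ p < n, ∀ q < n, f p q = g p q) : pvMk n f = pvMk n g := by
  unfold pvMk
  refine List.map_congr_left (fun p hp => List.map_congr_left (fun q hq => ?_))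
  exact h p (List.mem_range.mp hp) q (List.mem_range.mp hq)

theorem pvMk_modify_set (n i j : Nat) (_hi : i < n) (_hj : j < n) (v : Int) (f : Nat → Nat → Int) :
    (pvMk n f).modify i (fun row => row.set j v)
      = pvMk n (fun p q => if p = i ∧ q = j then v else f p q) := by
  apply List.ext_getElem
  · simp [pvMk]
  intro p hp hp'
  simp only [pvMk, List.length_map, List.length_range] at hp hp'
  simp only [pvMk, List.getElem_modify, List.getElem_map, List.getElem_range]
  by_cases hpi : i = p
  · subst hpi
    
    apply List.ext_getElem
    · simp
    intro q hq hq'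
    simp only [List.length_map, List.length_range] at hq hq'
    simp only [List.getElem_map, List.getElem_range]
    by_cases hqj : j = q
    · subst hqj; simp
    · simp [hqj, Ne.symm hqj]
  · simp only [if_neg hpi]
    refine List.map_congr_left (fun q _ => ?_)
    have : ¬ (p = i ∧ q = j) := fun h => hpi h.1.symm
    simp [this]

theorem pvStepA_eq (a1 a2 a3 : Int) (n k : Nat) (hk : k < n) :
    pvStepA a1 a2 a3 n (pvMk n (pvF a1 a2 a3 k)) k = pvMk n (pvF a1 a2 a3 (k+1)) := by
  unfold pvStepA pvWrA2 pvWrA3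
  rw [pvMk_modify_set n k k hk hk]
  by_cases h1 : k < n - 1
  · rw [if_pos h1, pvMk_modify_set n (k+1) k (by omega) hk,
      pvMk_modify_set n k (k+1) hk (by omega)]
    by_cases h2 : k < n - 2
    · rw [if_pos h2, pvMk_modify_set n (k+2) k (by omega) hk,
        pvMk_modify_set n k (k+2) hk (by omega)]
      apply pvMk_congr
      intro p hp q hq
      simp only [pvF, pvE]
      split_ifs <;> first | rfl | omega
    · rw [if_neg h2]
      apply pvMk_congr
      intro p hp q hq
      simp only [pvF, pvE]
      split_ifs <;> first | rfl | omega
  · rw [if_neg h1, if_neg (show ¬ k < n - 2 by omega)]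
    apply pvMk_congr
    intro p hp q hq
    simp only [pvF, pvE]
    split_ifs <;> first | rfl | omega

theorem pvFold_eq (a1 a2 a3 : Int) (n k : Nat) (hk : k ≤ n) :
    (List.range k).foldl (pvStepA a1 a2 a3 n) (pvMk n (fun _ _ => 0))
      = pvMk n (pvF a1 a2 a3 k) := by
  induction k with
  | zero =>
      simp only [List.range_zero, List.foldl_nil]
      exact pvMk_congr (fun p _ q _ => by simp [pvF])
  | succ k ih =>
      rw [List.range_succ, List.foldl_append, ih (by omega), List.foldl_cons, List.foldl_nil,
        pvStepA_eq a1 a2 a3 n k (by omega)]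

theorem pvGetD3 (a1 a2 a3 x : Int) :
    (PySem.Dict.ofList [((0 : Int), a1), (1, a2), (2, a3)]).getD x 0
      = if x = 0 then a1 else if x = 1 then a2 else if x = 2 then a3 else 0 := by
  have h : PySem.Dict.ofList [((0 : Int), a1), (1, a2), (2, a3)]
      = ((PySem.Dict.empty.insert (0 : Int) a1).insert 1 a2).insert 2 a3 := by rfl
  rw [h]
  simp only [PySem.Dict.getD_insert, PySem.Dict.getD_empty]
  split_ifs <;> first | rfl | omega

theorem pvBand_getD (a1 a2 a3 : Int) (p q : Nat) :
    (PySem.Dict.ofList [((0 : Int), a1), (1, a2), (2, a3)]).getD |(p : Int) - (q : Int)| 0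
      = pvE a1 a2 a3 p q := by
  rw [pvGetD3]
  have h0 : |(p : Int) - (q : Int)| = 0 ↔ p = q := by
    rw [abs_eq (by norm_num : (0:Int) ≤ 0)]; omega
  have h1 : |(p : Int) - (q : Int)| = 1 ↔ (q = p + 1 ∨ p = q + 1) := by
    rw [abs_eq (by norm_num : (0:Int) ≤ 1)]; omega
  have h2 : |(p : Int) - (q : Int)| = 2 ↔ (q = p + 2 ∨ p = q + 2) := by
    rw [abs_eq (by norm_num : (0:Int) ≤ 2)]; omega
  unfold pvE
  by_cases c0 : p = q
  · rw [if_pos (h0.mpr c0), if_pos c0]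
  rw [if_neg (fun h => c0 (h0.mp h)), if_neg c0]
  by_cases c1 : q = p + 1 ∨ p = q + 1
  · rw [if_pos (h1.mpr c1), if_pos c1]
  rw [if_neg (fun h => c1 (h1.mp h)), if_neg c1]
  by_cases c2 : q = p + 2 ∨ p = q + 2
  · rw [if_pos (h2.mpr c2), if_pos c2]
  rw [if_neg (fun h => c2 (h2.mp h)), if_neg c2]

-- ===== VERDICT (by name: the statement is the Claim_ definition above) =====
theorem create_system_matrix_spec : Claim_equal_create_system_matrix := by
  intro a1 a2 a3 size _
  unfold Spec_create_system_matrix create_system_matrix create_system_matrix_alt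
  set n := size.toNat with hn
  calc (List.range n).foldl (pvStepA a1 a2 a3 n)
          ((List.range n).map (fun _ => (List.range n).map (fun _ => (0 : Int))))
      = pvMk n (pvF a1 a2 a3 n) := pvFold_eq a1 a2 a3 n n le_rfl
    _ = pvMk n (fun (p q : Nat) =>
          (PySem.Dict.ofList [((0 : Int), a1), (1, a2), (2, a3)]).getD |(p : Int) - (q : Int)| 0) := by
        apply pvMk_congr
        intro p hp q hq
        rw [pvBand_getD]
        simp [pvF, hp]
    _ = _ := rfl
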